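-- pv_equiv track=rewrite | github.com/annalujansen/Estrutura-De-Dados | ED/pilha/pilha_eq.py | posfixa
-- ===== SOURCE A (Python) =====
-- class Stack:
--      def __init__(self):
--          self.items = []
--
--      def isEmpty(self):
--          return self.items == []
--
--      def push(self, item):
--          self.items.append(item)
--
--      def pop(self):
--          return self.items.pop()
--
--      def peek(self):
--          return self.items[-1]
--
--      def size(self):
--          return len(self.items)
--
-- def posfixa(equacao):
--     p = Stack()
--     saida = []
--     for e in equacao:
--        if e == "+" or e == "-" or e =="*" or e == "/": #operador
--           if e == "+" or e == "-": # + ou -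
--              while (not p.isEmpty()) and (p.peek() != "("):
--                 saida.append(p.pop())
--           else: # * ou /
--              while (not p.isEmpty()) and (p.peek() == "*" or p.peek() == "/"):
--                 saida.append(p.pop())
--           p.push(e)
--        elif e == "(":
--           p.push("(")
--        elif e == ")":
--           while p.peek() != "(":
--             saida.append(p.pop())
--             #x = p.pop()
--             #saida.append(x)
--           p.pop()
--        else: #operando
--           saida.append(e)
--     while not p.isEmpty():
--         saida.append(p.pop())
--     return saida
-- ===== SOURCE B (Python) =====
-- def posfixa(equacao):
--     # One operator list per open parenthesis group, innermost last; no "(" sentinels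
--     # ever enter a stack, and nesting is tracked by the frame list itself.  On
--     # unmatched "(" this returns a pure postfix output (no "(" tokens), unlike A.
--     frames = [[]]
--     out = []
--     for e in equacao:
--         if e == "+" or e == "-":
--             out.extend(reversed(frames[-1]))
--             frames[-1] = [e]
--         elif e == "*" or e == "/":
--             ops = frames[-1]
--             while ops and (ops[-1] == "*" or ops[-1] == "/"):
--                 out.append(ops.pop())
--             ops.append(e)
--         elif e == "(":
--             frames.append([])
--         elif e == ")":
--             out.extend(reversed(frames.pop()))
--         else:
--             out.append(e)
--     for ops in reversed(frames):
--         out.extend(reversed(ops))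
--     return out
-- ===== Notes on version B (the rewrite author's own statement) =====
-- stated objective: alternative
-- what changed: Replaces A's single stack with '(' sentinel markers and two hard-coded operator drain loops by a list of per-parenthesis-group operator frames: '(' opens a new empty frame, ')' flushes and drops the innermost frame, '+'/'-' flush and replace the innermost frame, so no parenthesis token is ever stored or emitted.
-- intended difference: On inputs with more '(' than ')' (and no prefix with excess ')'), A flushes the leftover '(' markers into its result so the 'postfix' output contains '(' tokens, while B closes the open groups and returns pure postfix with no parentheses, which is the intended output. — e.g. on posfixa(["(", "1"]): A returns ["1", "("], B returns ["1"]
import Mathlib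
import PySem

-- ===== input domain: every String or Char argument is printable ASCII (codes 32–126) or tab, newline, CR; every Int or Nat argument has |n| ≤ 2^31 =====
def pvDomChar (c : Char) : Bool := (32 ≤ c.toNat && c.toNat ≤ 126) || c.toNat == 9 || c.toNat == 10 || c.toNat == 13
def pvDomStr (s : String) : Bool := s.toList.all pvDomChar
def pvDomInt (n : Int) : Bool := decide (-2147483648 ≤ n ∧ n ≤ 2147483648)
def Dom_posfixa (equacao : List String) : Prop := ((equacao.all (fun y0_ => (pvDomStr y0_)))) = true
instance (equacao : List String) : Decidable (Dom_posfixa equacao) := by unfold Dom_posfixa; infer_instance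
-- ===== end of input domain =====

-- B replaces A's single sentinel-marked stack by a list of per-parenthesis-group operator lists (no "(" ever stored), and on unmatched "(" emits pure postfix instead of A's stray "(" tokens; same O(n) cost.
-- A mutates nothing observable; equivalence is about the return value.


-- ===== PORT A =====
-- Stack represented as a Lean list with head = top (Python list end).
-- A's inner while for '+'/'-': pop while top ≠ "("
def drainPM : List String → List String → (List String × List String)
| [], saida => ([], saida)
| t :: rest, saida =>
    if t ≠ "(" then drainPM rest (saida ++ [t]) else (t :: rest, saida)

-- A's inner while for '*'/'/': pop while top = "*" or top = "/"
def drainMD : List String → List String → (List String × List String)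
| [], saida => ([], saida)
| t :: rest, saida =>
    if t = "*" ∨ t = "/" then drainMD rest (saida ++ [t]) else (t :: rest, saida)

-- A's ')' while: pop until "(" then discard it; Python raises IndexError on
-- an empty stack here (excluded by Pre_), the port returns the state unchanged there.
def drainRP : List String → List String → (List String × List String)
| [], saida => ([], saida)
| t :: rest, saida =>
    if t = "(" then (rest, saida) else drainRP rest (saida ++ [t])

def posfixaLoop : List String → List String → List String → List String
| [], p, saida => saida ++ p
| e :: rest, p, saida =>
    if e = "+" ∨ e = "-" ∨ e = "*" ∨ e = "/" then
      if e = "+" ∨ e = "-" then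
        let st := drainPM p saida
        posfixaLoop rest (e :: st.1) st.2
      else
        let st := drainMD p saida
        posfixaLoop rest (e :: st.1) st.2
    else if e = "(" then posfixaLoop rest ("(" :: p) saida
    else if e = ")" then
      let st := drainRP p saida
      posfixaLoop rest st.1 st.2
    else posfixaLoop rest p (saida ++ [e])

def posfixa (equacao : List String) : List String := posfixaLoop equacao [] []

-- ===== PORT B =====
-- B's inner while for '*'/'/': pop ops while top is "*" or "/" (frame head = top).
def drainStar : List String → List String → (List String × List String)
| [], out => ([], out)
| t :: rest, out =>
    if t = "*" ∨ t = "/" then drainStar rest (out ++ [t]) else (t :: rest, out)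

-- B's for-loop as a state evolution over (frames, out); frames head = innermost
-- group, each frame head = top operator.  The `[]` frame-stack cases correspond to
-- Python raising IndexError on frames[-1] / looping over nothing; they are
-- unreachable under Pre_ (a popped-empty base frame only arises past an unmatched ")").
def evolveB : List String → List (List String) → List String → (List (List String) × List String)
| [], frames, out => (frames, out)
| e :: rest, frames, out =>
    if e = "+" ∨ e = "-" then
      match frames with
      | [] => evolveB rest [] out
      | f :: fs => evolveB rest ([e] :: fs) (out ++ f)
    else if e = "*" ∨ e = "/" then
      match frames with
      | [] => evolveB rest [] out
      | f :: fs =>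
          let r := drainStar f out
          evolveB rest ((e :: r.1) :: fs) r.2
    else if e = "(" then evolveB rest ([] :: frames) out
    else if e = ")" then
      match frames with
      | [] => evolveB rest [] out
      | f :: fs => evolveB rest fs (out ++ f)
    else evolveB rest frames (out ++ [e])

-- final flush: for ops in reversed(frames): out.extend(reversed(ops))
def posfixa_alt (equacao : List String) : List String :=
  let r := evolveB equacao [[]] []
  r.2 ++ r.1.flatten

-- ===== PRECONDITION & SPEC =====
-- Pre_ excludes exactly the inputs with some prefix holding more ")" than "(",
-- on which the Python A raises IndexError (peek on an emptied stack).
def Pre_posfixa (equacao : List String) : Prop :=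
  ∀ n ∈ List.range (equacao.length + 1),
    (equacao.take n).count ")" ≤ (equacao.take n).count "("
instance (equacao : List String) : Decidable (Pre_posfixa equacao) := by
  unfold Pre_posfixa; infer_instance
def pvWitness_posfixa : List String := ["(", "1", "+", "2", ")", "*", "x"]

-- On inputs with unmatched "(" (more "(" than ")") A flushes the leftover "("
-- markers into the result, so its "postfix" output contains "(" tokens; B closes
-- the open groups and returns pure postfix, which is the intended output.
def D_posfixa (equacao : List String) : Prop :=
  Pre_posfixa equacao ∧ equacao.count ")" < equacao.count "("
instance (equacao : List String) : Decidable (D_posfixa equacao) := by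
  unfold D_posfixa; infer_instance

def Spec_posfixa (equacao : List String) (out : List String) : Prop :=
  ¬ D_posfixa equacao → out = posfixa_alt equacao
instance (equacao : List String) (out : List String) : Decidable (Spec_posfixa equacao out) := by unfold Spec_posfixa; infer_instance

def pvDiffWitness_posfixa : List String := ["(", "1"]
def pvDiffWitnessOut_posfixa : (List String) × (List String) := (["1", "("], ["1"])

-- ===== CLAIM (what is proved, stated in full; the proofs are below) =====
def Claim_unchanged_posfixa : Prop := ∀ (equacao : List String), Dom_posfixa equacao → Pre_posfixa equacao → Spec_posfixa equacao (posfixa equacao)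
def Claim_changed_posfixa : Prop := Dom_posfixa (pvDiffWitness_posfixa) ∧ Pre_posfixa (pvDiffWitness_posfixa) ∧ D_posfixa (pvDiffWitness_posfixa) ∧ posfixa (pvDiffWitness_posfixa) = pvDiffWitnessOut_posfixa.1 ∧ posfixa_alt (pvDiffWitness_posfixa) = pvDiffWitnessOut_posfixa.2 ∧ pvDiffWitnessOut_posfixa.1 ≠ pvDiffWitnessOut_posfixa.2
def Claim_exact_posfixa : Prop := ∀ (equacao : List String), Dom_posfixa equacao → Pre_posfixa equacao → D_posfixa equacao → posfixa equacao ≠ posfixa_alt equacao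

-- ===== LEMMAS AND PROOFS =====
def isOp (t : String) : Prop := t = "+" ∨ t = "-" ∨ t = "*" ∨ t = "/"

-- A's stack corresponding to B's frames: innermost frame, then "(" before each
-- enclosing frame's operators.
def rep : List (List String) → List String
| [] => []
| f :: fs => f ++ fs.flatMap (fun g => "(" :: g)

lemma drainPM_rep (f : List String) (fs : List (List String)) (out : List String)
    (hf : ∀ t ∈ f, isOp t) :
    drainPM (rep (f :: fs)) out = (fs.flatMap (fun g => "(" :: g), out ++ f) := by
  induction f generalizing out with
  | nil =>
    cases fs with
    | nil => simp [rep, drainPM]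
    | cons g gs => simp [rep, drainPM]
  | cons t f ih =>
    have ht : isOp t := hf t List.mem_cons_self
    have hne : t ≠ "(" := by rcases ht with h|h|h|h <;> subst h <;> decide
    have hrest : ∀ u ∈ f, isOp u := fun u hu => hf u (List.mem_cons_of_mem _ hu)
    simp only [rep, List.cons_append, drainPM, if_pos hne]
    have := ih (out ++ [t]) hrest
    simp only [rep] at this
    rw [this]; simp

lemma drainMD_rep (f : List String) (fs : List (List String)) (out : List String) :
    drainMD (rep (f :: fs)) out =
      ((drainStar f out).1 ++ fs.flatMap (fun g => "(" :: g), (drainStar f out).2) := by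
  induction f generalizing out with
  | nil =>
    cases fs with
    | nil => simp [rep, drainMD, drainStar]
    | cons g gs => simp [rep, drainMD, drainStar]
  | cons t f ih =>
    by_cases h : t = "*" ∨ t = "/"
    · simp only [rep, List.cons_append, drainMD, drainStar, if_pos h]
      have := ih (out ++ [t]); simp only [rep] at this; rw [this]
    · simp [rep, drainMD, drainStar, h]

lemma drainRP_rep (f : List String) (fs : List (List String)) (out : List String)
    (hf : ∀ t ∈ f, isOp t) (hfs : fs ≠ []) :
    drainRP (rep (f :: fs)) out = (rep fs, out ++ f) := by
  induction f generalizing out with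
  | nil =>
    cases fs with
    | nil => exact absurd rfl hfs
    | cons g gs => simp [rep, drainRP]
  | cons t f ih =>
    have ht : isOp t := hf t List.mem_cons_self
    have hne : t ≠ "(" := by rcases ht with h|h|h|h <;> subst h <;> decide
    have hrest : ∀ u ∈ f, isOp u := fun u hu => hf u (List.mem_cons_of_mem _ hu)
    simp only [rep, List.cons_append, drainRP, if_neg hne]
    have := ih (out ++ [t]) hrest
    simp only [rep] at this
    rw [this]; simp

lemma drainStar_mem_fst (f out : List String) :
    ∀ t ∈ (drainStar f out).1, t ∈ f := by
  induction f generalizing out with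
  | nil => simp [drainStar]
  | cons t f ih =>
    simp only [drainStar]; split_ifs with h
    · intro u hu; exact List.mem_cons_of_mem _ (ih _ u hu)
    · intro u hu; exact hu

lemma drainStar_mem_snd (f out : List String) :
    ∀ t ∈ (drainStar f out).2, t ∈ out ∨ t ∈ f := by
  induction f generalizing out with
  | nil => simp [drainStar]
  | cons t f ih =>
    simp only [drainStar]; split_ifs with h
    · intro u hu
      rcases ih (out ++ [t]) u hu with h1 | h1
      · rcases List.mem_append.mp h1 with h2 | h2
        · exact Or.inl h2
        · have : u = t := by simpa using h2
          exact Or.inr (by simp [this])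
      · exact Or.inr (List.mem_cons_of_mem _ h1)
    · intro u hu; exact Or.inl hu

-- balance condition: before every ")" of rest, at least two frames remain
def Bal (rest : List String) (k : ℕ) : Prop :=
  ∀ n, rest[n]? = some ")" →
    (rest.take n).count ")" + 2 ≤ (rest.take n).count "(" + k

lemma bal_tail_keep (e : String) (rest : List String) (k : ℕ)
    (h1 : e ≠ "(") (h2 : e ≠ ")") (h : Bal (e :: rest) k) : Bal rest k := by
  intro n hn
  have := h (n + 1) (by simpa using hn)
  simp [h1, h2] at this ⊢
  omega

lemma bal_tail_open (rest : List String) (k : ℕ)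
    (h : Bal ("(" :: rest) k) : Bal rest (k + 1) := by
  intro n hn
  have := h (n + 1) (by simpa using hn)
  simp at this ⊢
  omega

lemma bal_tail_close (rest : List String) (k : ℕ)
    (h : Bal (")" :: rest) (k + 1)) : Bal rest k := by
  intro n hn
  have := h (n + 1) (by simpa using hn)
  simp at this ⊢
  omega

lemma isOps_cons {f : List String} {fs : List (List String)}
    (hf : ∀ t ∈ f, isOp t) (hfs : ∀ g ∈ fs, ∀ t ∈ g, isOp t) :
    ∀ g ∈ f :: fs, ∀ t ∈ g, isOp t := by
  intro g hg
  rcases List.mem_cons.mp hg with h | h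
  · subst h; exact hf
  · exact hfs g h

-- Main invariant: A's loop on rep frames tracks B's evolution, frames stay
-- nonempty with operator-only contents, and the frame count follows the balance.
lemma evolve_main : ∀ (rest : List String) (frames : List (List String)) (out : List String),
    frames ≠ [] →
    (∀ g ∈ frames, ∀ t ∈ g, isOp t) →
    Bal rest frames.length →
    posfixaLoop rest (rep frames) out
        = (evolveB rest frames out).2 ++ rep (evolveB rest frames out).1
      ∧ (evolveB rest frames out).1 ≠ []
      ∧ (∀ g ∈ (evolveB rest frames out).1, ∀ t ∈ g, isOp t)
      ∧ (evolveB rest frames out).1.length + rest.count ")"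
          = frames.length + rest.count "(" := by
  intro rest
  induction rest with
  | nil =>
    intro frames out hne hops _
    exact ⟨rfl, hne, hops, by simp [evolveB]⟩
  | cons e rest ih =>
    intro frames out hne hops hbal
    obtain ⟨f, fs, rfl⟩ := List.exists_cons_of_ne_nil hne
    have hf : ∀ t ∈ f, isOp t := hops f List.mem_cons_self
    have hfs : ∀ g ∈ fs, ∀ t ∈ g, isOp t := fun g hg => hops g (List.mem_cons_of_mem _ hg)
    by_cases hPM : e = "+" ∨ e = "-"
    · have hop4 : e = "+" ∨ e = "-" ∨ e = "*" ∨ e = "/" := by tauto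
      have hne1 : e ≠ "(" := by rcases hPM with h|h <;> subst h <;> decide
      have hne2 : e ≠ ")" := by rcases hPM with h|h <;> subst h <;> decide
      have hops1 : ∀ t ∈ ([e] : List String), isOp t := by
        intro t ht
        have : t = e := by simpa using ht
        subst this
        rcases hPM with h|h <;> subst h <;> simp [isOp]
      have hstep := ih ([e] :: fs) (out ++ f) (by simp)
        (isOps_cons hops1 hfs)
        (by simpa using bal_tail_keep e rest _ hne1 hne2 hbal)
      have hA : posfixaLoop (e :: rest) (rep (f :: fs)) out
          = posfixaLoop rest (rep ([e] :: fs)) (out ++ f) := by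
        simp only [posfixaLoop, if_pos hop4, if_pos hPM, drainPM_rep f fs out hf]
        rfl
      have hB : evolveB (e :: rest) (f :: fs) out = evolveB rest ([e] :: fs) (out ++ f) := by
        simp only [evolveB, if_pos hPM]
      refine ⟨?_, ?_, ?_, ?_⟩
      · rw [hA, hB]; exact hstep.1
      · rw [hB]; exact hstep.2.1
      · rw [hB]; exact hstep.2.2.1
      · rw [hB]
        have := hstep.2.2.2
        simp [List.count_cons, hne1, hne2] at this ⊢
        omega
    · by_cases hMD : e = "*" ∨ e = "/"
      · have hop4 : e = "+" ∨ e = "-" ∨ e = "*" ∨ e = "/" := by tauto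
        have hne1 : e ≠ "(" := by rcases hMD with h|h <;> subst h <;> decide
        have hne2 : e ≠ ")" := by rcases hMD with h|h <;> subst h <;> decide
        have hops1 : ∀ t ∈ e :: (drainStar f out).1, isOp t := by
          intro t ht
          rcases List.mem_cons.mp ht with h | h
          · subst h; rcases hMD with h|h <;> subst h <;> simp [isOp]
          · exact hf t (drainStar_mem_fst f out t h)
        have hstep := ih ((e :: (drainStar f out).1) :: fs) (drainStar f out).2 (by simp)
          (isOps_cons hops1 hfs)
          (by simpa using bal_tail_keep e rest _ hne1 hne2 hbal)
        have hA : posfixaLoop (e :: rest) (rep (f :: fs)) out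
            = posfixaLoop rest (rep ((e :: (drainStar f out).1) :: fs)) (drainStar f out).2 := by
          simp only [posfixaLoop, if_pos hop4, if_neg hPM, drainMD_rep f fs out]
          rfl
        have hB : evolveB (e :: rest) (f :: fs) out
            = evolveB rest ((e :: (drainStar f out).1) :: fs) (drainStar f out).2 := by
          simp only [evolveB, if_neg hPM, if_pos hMD]
        refine ⟨?_, ?_, ?_, ?_⟩
        · rw [hA, hB]; exact hstep.1
        · rw [hB]; exact hstep.2.1
        · rw [hB]; exact hstep.2.2.1
        · rw [hB]
          have := hstep.2.2.2
          simp [List.count_cons, hne1, hne2] at this ⊢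
          omega
      · have hop4 : ¬ (e = "+" ∨ e = "-" ∨ e = "*" ∨ e = "/") := by tauto
        by_cases hLP : e = "("
        · subst hLP
          have hstep := ih ([] :: f :: fs) out (by simp)
            (isOps_cons (by simp) hops)
            (by simpa using bal_tail_open rest _ hbal)
          have hA : posfixaLoop ("(" :: rest) (rep (f :: fs)) out
              = posfixaLoop rest (rep ([] :: f :: fs)) out := by
            simp only [posfixaLoop, if_neg hop4, if_pos rfl]
            rfl
          have hB : evolveB ("(" :: rest) (f :: fs) out = evolveB rest ([] :: f :: fs) out := by
            simp only [evolveB, if_neg hPM, if_neg hMD, if_pos rfl]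
            rfl
          refine ⟨?_, ?_, ?_, ?_⟩
          · rw [hA, hB]; exact hstep.1
          · rw [hB]; exact hstep.2.1
          · rw [hB]; exact hstep.2.2.1
          · rw [hB]
            have := hstep.2.2.2
            simp [List.count_cons] at this ⊢
            omega
        · by_cases hRP : e = ")"
          · subst hRP
            have h2 : 2 ≤ (f :: fs).length := by
              have := hbal 0 (by simp)
              simpa using this
            obtain ⟨g, gs, rfl⟩ : ∃ g gs, fs = g :: gs := by
              cases fs with
              | nil => simp at h2
              | cons g gs => exact ⟨g, gs, rfl⟩
            have hstep := ih (g :: gs) (out ++ f) (by simp) hfs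
              (by
                have hb : Bal (")" :: rest) ((g :: gs).length + 1) := by simpa using hbal
                exact bal_tail_close rest _ hb)
            have hA : posfixaLoop (")" :: rest) (rep (f :: g :: gs)) out
                = posfixaLoop rest (rep (g :: gs)) (out ++ f) := by
              simp only [posfixaLoop, if_neg hop4, if_neg hLP, if_pos rfl,
                drainRP_rep f (g :: gs) out hf (by simp)]
              rfl
            have hB : evolveB (")" :: rest) (f :: g :: gs) out
                = evolveB rest (g :: gs) (out ++ f) := by
              simp only [evolveB, if_neg hPM, if_neg hMD, if_neg hLP, if_pos rfl]
              rfl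
            refine ⟨?_, ?_, ?_, ?_⟩
            · rw [hA, hB]; exact hstep.1
            · rw [hB]; exact hstep.2.1
            · rw [hB]; exact hstep.2.2.1
            · rw [hB]
              have := hstep.2.2.2
              simp [List.count_cons] at this ⊢
              omega
          · have hstep := ih (f :: fs) (out ++ [e]) (by simp) hops
              (bal_tail_keep e rest _ hLP hRP hbal)
            have hA : posfixaLoop (e :: rest) (rep (f :: fs)) out
                = posfixaLoop rest (rep (f :: fs)) (out ++ [e]) := by
              simp only [posfixaLoop, if_neg hop4, if_neg hLP, if_neg hRP]
            have hB : evolveB (e :: rest) (f :: fs) out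
                = evolveB rest (f :: fs) (out ++ [e]) := by
              simp only [evolveB, if_neg hPM, if_neg hMD, if_neg hLP, if_neg hRP]
            refine ⟨?_, ?_, ?_, ?_⟩
            · rw [hA, hB]; exact hstep.1
            · rw [hB]; exact hstep.2.1
            · rw [hB]; exact hstep.2.2.1
            · rw [hB]
              have := hstep.2.2.2
              simp [List.count_cons, hLP, hRP] at this ⊢
              omega

-- B's output never contains "(" (needed for Claim_exact_)
lemma evolve_noParen : ∀ (rest : List String) (frames : List (List String)) (out : List String),
    "(" ∉ out →
    (∀ g ∈ frames, ∀ t ∈ g, isOp t) →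
    "(" ∉ (evolveB rest frames out).2 := by
  intro rest
  induction rest with
  | nil => intro frames out hout _; exact hout
  | cons e rest ih =>
    intro frames out hout hops
    have notop : ∀ (f : List String), (∀ t ∈ f, isOp t) → "(" ∉ out ++ f := by
      intro f hf h
      rcases List.mem_append.mp h with h1 | h1
      · exact hout h1
      · rcases hf _ h1 with h2|h2|h2|h2 <;> simp at h2
    by_cases hPM : e = "+" ∨ e = "-"
    · cases frames with
      | nil => simpa [evolveB, hPM] using ih [] out hout (by simp)
      | cons f fs =>
        simp only [evolveB, if_pos hPM]
        refine ih _ _ (notop f (hops f List.mem_cons_self)) ?_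
        refine isOps_cons ?_ (fun g hg => hops g (List.mem_cons_of_mem _ hg))
        intro t ht
        have : t = e := by simpa using ht
        subst this
        rcases hPM with h|h <;> subst h <;> simp [isOp]
    · by_cases hMD : e = "*" ∨ e = "/"
      · cases frames with
        | nil => simpa [evolveB, hPM, hMD] using ih [] out hout (by simp)
        | cons f fs =>
          have hf := hops f List.mem_cons_self
          simp only [evolveB, if_neg hPM, if_pos hMD]
          refine ih _ _ ?_ ?_
          · intro h
            rcases drainStar_mem_snd f out _ h with h1 | h1
            · exact hout h1
            · rcases hf _ h1 with h2|h2|h2|h2 <;> simp at h2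
          · refine isOps_cons ?_ (fun g hg => hops g (List.mem_cons_of_mem _ hg))
            intro t ht
            rcases List.mem_cons.mp ht with h | h
            · subst h; rcases hMD with h|h <;> subst h <;> simp [isOp]
            · exact hf t (drainStar_mem_fst f out t h)
      · by_cases hLP : e = "("
        · subst hLP
          simp only [evolveB, if_neg hPM, if_neg hMD, if_pos rfl]
          show "(" ∉ (evolveB rest ([] :: frames) out).2
          exact ih _ _ hout (isOps_cons (by simp) hops)
        · by_cases hRP : e = ")"
          · subst hRP
            cases frames with
            | nil => simpa [evolveB, hPM, hMD] using ih [] out hout (by simp)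
            | cons f fs =>
              simp only [evolveB, if_neg hPM, if_neg hMD, if_neg hLP, if_pos rfl]
              show "(" ∉ (evolveB rest fs (out ++ f)).2
              exact ih _ _ (notop f (hops f List.mem_cons_self))
                (fun g hg => hops g (List.mem_cons_of_mem _ hg))
          · simp only [evolveB, if_neg hPM, if_neg hMD, if_neg hLP, if_neg hRP]
            refine ih _ _ ?_ hops
            intro h
            rcases List.mem_append.mp h with h1 | h1
            · exact hout h1
            · simp at h1; exact hLP h1.symm

lemma pre_bal (equacao : List String) (h : Pre_posfixa equacao) : Bal equacao 1 := by
  intro n hn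
  have hlt : n < equacao.length := (List.getElem?_eq_some_iff.mp hn).1
  have h1 := h (n + 1) (by simp [List.mem_range]; omega)
  have htake : equacao.take (n + 1) = equacao.take n ++ [")"] := by
    rw [List.take_succ]
    simp [List.getElem?_eq_some_iff.mp hn |>.2, hn]
  rw [htake] at h1
  simp [List.count_append] at h1
  omega

lemma main_setup (equacao : List String) (h : Pre_posfixa equacao) :
    posfixa equacao
        = (evolveB equacao [[]] []).2 ++ rep (evolveB equacao [[]] []).1
      ∧ (evolveB equacao [[]] []).1 ≠ []
      ∧ (∀ g ∈ (evolveB equacao [[]] []).1, ∀ t ∈ g, isOp t)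
      ∧ (evolveB equacao [[]] []).1.length + equacao.count ")"
          = 1 + equacao.count "(" := by
  have := evolve_main equacao [[]] [] (by simp) (by simp) (by simpa using pre_bal equacao h)
  simpa [posfixa, rep] using this

-- ===== VERDICT (by name: the statement is the Claim_ definition above) =====
theorem posfixa_spec : Claim_unchanged_posfixa := by
  intro equacao _ hpre hnd
  obtain ⟨hA, hne, _, hlen⟩ := main_setup equacao hpre
  have hcnt : equacao.count "(" ≤ equacao.count ")" := by
    by_contra hc
    exact hnd ⟨hpre, by omega⟩
  have hge : equacao.count ")" ≤ equacao.count "(" := by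
    have h2 := hpre equacao.length (by simp)
    simpa using h2
  have h1 : (evolveB equacao [[]] []).1.length = 1 := by omega
  obtain ⟨f, fs, hffs⟩ := List.exists_cons_of_ne_nil hne
  have hfs : fs = [] := by
    have := h1; rw [hffs] at this; simpa using this
  subst hfs
  rw [hA, hffs]
  simp only [posfixa_alt]
  rw [hffs]
  simp [rep]

theorem posfixa_changed : Claim_changed_posfixa := by unfold Claim_changed_posfixa; decide

theorem posfixa_tight : Claim_exact_posfixa := by
  intro equacao _ hpre hd heq
  obtain ⟨hA, hne, hops, hlen⟩ := main_setup equacao hpre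
  obtain ⟨f, fs, hffs⟩ := List.exists_cons_of_ne_nil hne
  have h2 : 2 ≤ (evolveB equacao [[]] []).1.length := by
    rcases hd with ⟨_, hc⟩; omega
  obtain ⟨g, gs, hgs⟩ : ∃ g gs, fs = g :: gs := by
    cases fs with
    | nil =>
      rw [hffs] at h2; simp at h2
    | cons g gs => exact ⟨g, gs, rfl⟩
  have hmemA : "(" ∈ posfixa equacao := by
    rw [hA, hffs, hgs]
    simp [rep]
  have hmemB : "(" ∉ posfixa_alt equacao := by
    intro h
    simp only [posfixa_alt, List.mem_append] at h
    rcases h with h | h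
    · exact evolve_noParen equacao [[]] [] (by simp) (by simp) h
    · rw [List.mem_flatten] at h
      obtain ⟨g', hg', hmem⟩ := h
      rcases hops g' hg' _ hmem with h1|h1|h1|h1 <;> simp at h1
  rw [heq] at hmemA
  exact hmemB hmemA
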